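-- pv_equiv track=rewrite | github.com/rajil21/DataStructures-Algorithms | get-maximum-in-generated-array/get-maximum-in-generated-array.py | getMaximumGenerated
-- ===== SOURCE A (Python) =====
-- def getMaximumGenerated(n):
--     """
--     :type n: int
--     :rtype: int
--     """
--     L = [0,1]
--     i=1
--     while(len(L)<n+1):
--         L.append(L[i])
--         L.append(L[i]+L[i+1])
--         i+=1
--     return max(L[:-1]) if n%2==0 else max(L)
-- ===== SOURCE B (Python) =====
-- def getMaximumGenerated(n):
--     # Each value g(i) is computed independently in O(log i) by descending the
--     # binary digits of i (after the leading 1) with the pair state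
--     # (a, b) = (g(cur), g(cur+1)): digit 0 maps it to (a, a+b), digit 1 to
--     # (a+b, b) (Calkin-Wilf / Stern bit descent); a running max scans i=1..n.
--     def g(i):
--         bits = []
--         while i > 1:
--             bits.append(i % 2)
--             i //= 2
--         a = 1
--         b = 1
--         for bit in reversed(bits):
--             if bit:
--                 a = a + b
--             else:
--                 b = a + b
--         return a
--     best = 0
--     for i in range(1, n + 1):
--         best = max(best, g(i))
--     return best
-- ===== Notes on version B (the rewrite author's own statement) =====
-- stated objective: alternative
-- what changed: Replaces A's bottom-up array construction (two appends per step via a back pointer, then a parity-dependent trim before max) by an array-free method: each value g(i) is computed independently by the Calkin-Wilf/Stern bit descent over the binary digits of i maintaining the pair (g(cur), g(cur+1)), and a running-max accumulator scans i=1..n, so no list of results is ever built.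
-- intended difference: On odd negative n (an impossible count where nothing should be generated) A returns 1, an artefact of its parity trim over the seed list [0, 1], while B returns 0, the maximum of an empty generation, which is the intended value; on all other n, including even negative n, they agree. — e.g. on getMaximumGenerated(-1): A returns 1, B returns 0
import Mathlib
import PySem

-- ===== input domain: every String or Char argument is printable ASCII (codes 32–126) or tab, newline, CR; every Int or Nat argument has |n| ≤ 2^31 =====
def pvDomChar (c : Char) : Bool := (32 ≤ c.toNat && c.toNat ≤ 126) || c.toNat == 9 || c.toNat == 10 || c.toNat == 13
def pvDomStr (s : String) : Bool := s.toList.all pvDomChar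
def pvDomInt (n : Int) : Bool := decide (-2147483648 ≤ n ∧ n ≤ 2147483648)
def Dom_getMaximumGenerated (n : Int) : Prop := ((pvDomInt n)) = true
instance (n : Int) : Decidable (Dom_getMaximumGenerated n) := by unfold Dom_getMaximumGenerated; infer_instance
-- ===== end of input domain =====

-- B replaces A's bottom-up array build (two appends per step plus parity trim) by an
-- array-free method: each value is computed independently by the Calkin-Wilf/Stern bit
-- descent over the binary digits of its index, under a running-max accumulator.
-- A and B agree on all n except odd negative n (an impossible count), where A's
-- parity trim over the seed list yields 1 while B returns the intended 0 (see D_).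


-- ===== PORT A =====
-- Python lists are dynamic arrays, so A's loop keeps its list in a Lean Array
-- (push/index O(1), as in Python); i and i+1 are always in range (the invariant
-- in the proofs shows it), so Array.getD with default 0 is exact here.
def aLoop (n : Int) (L : Array Int) (i : Nat) : Array Int :=
  if h : (L.size : Int) < n + 1 then
    let L1 := L.push (L.getD i 0)
    let L2 := L1.push (L1.getD i 0 + L1.getD (i + 1) 0)
    aLoop n L2 (i + 1)
  else L
  termination_by (n + 1 - L.size).toNat
  decreasing_by simp only [Array.size_push]; omega

-- max(xs): the lists are never empty here, so the none arm is unreachable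
def pyMax (xs : List Int) : Int := (PySem.List.max? xs (fun y => y)).getD 0

def getMaximumGenerated (n : Int) : Int :=
  let L := (aLoop n #[0, 1] 1).toList
  if n % 2 == 0 then pyMax (PySem.List.slice L none (some (-1))) else pyMax L

-- ===== PORT B =====
-- Source B's inner helper g: the while-loop collecting the binary digits of i
-- (LSB first; cons = append order of the Python list)
def bBits (i : Int) : List Int :=
  if 1 < i then PySem.Int.mod i 2 :: bBits (PySem.Int.floordiv i 2) else []
  termination_by i.toNat
  decreasing_by
    simp only [PySem.Int.floordiv_eq_ediv_of_pos (by omega : (0:Int) < 2)] at *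
    omega

-- the for-loop over reversed(bits) with the pair state (a, b)
def gOf (i : Int) : Int :=
  ((bBits i).reverse.foldl
    (fun (p : Int × Int) bit =>
      if bit == 0 then (p.1, p.1 + p.2) else (p.1 + p.2, p.2)) (1, 1)).1

-- the running-max accumulator loop over range(1, n+1)
def getMaximumGenerated_alt (n : Int) : Int :=
  (PySem.List.pyRange 1 (n + 1) 1).foldl (fun best i => max best (gOf i)) 0

-- ===== PRECONDITION & SPEC =====
-- For negative n (an impossible count, where nothing should be generated) A returns 1
-- when n is odd — an artefact of its trim-by-parity final step over the seed list
-- [0, 1] — while B returns 0, the maximum of an empty generation, which is the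
-- intended value; on all other inputs (including even negative n) A and B agree.
def D_getMaximumGenerated (n : Int) : Prop := n < 0 ∧ n % 2 = 1
instance (n : Int) : Decidable (D_getMaximumGenerated n) := by unfold D_getMaximumGenerated; infer_instance
def Spec_getMaximumGenerated (n : Int) (out : Int) : Prop := ¬ D_getMaximumGenerated n → out = getMaximumGenerated_alt n
instance (n : Int) (out : Int) : Decidable (Spec_getMaximumGenerated n out) := by unfold Spec_getMaximumGenerated; infer_instance
def pvDiffWitness_getMaximumGenerated : Int := -1
def pvDiffWitnessOut_getMaximumGenerated : Int × Int := (1, 0)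

-- ===== CLAIM (what is proved, stated in full; the proofs are below) =====
def Claim_unchanged_getMaximumGenerated : Prop := ∀ (n : Int), Dom_getMaximumGenerated n → Spec_getMaximumGenerated n (getMaximumGenerated n)
def Claim_changed_getMaximumGenerated : Prop := Dom_getMaximumGenerated (pvDiffWitness_getMaximumGenerated) ∧ D_getMaximumGenerated (pvDiffWitness_getMaximumGenerated) ∧ getMaximumGenerated (pvDiffWitness_getMaximumGenerated) = pvDiffWitnessOut_getMaximumGenerated.1 ∧ getMaximumGenerated_alt (pvDiffWitness_getMaximumGenerated) = pvDiffWitnessOut_getMaximumGenerated.2 ∧ pvDiffWitnessOut_getMaximumGenerated.1 ≠ pvDiffWitnessOut_getMaximumGenerated.2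
def Claim_exact_getMaximumGenerated : Prop := ∀ (n : Int), Dom_getMaximumGenerated n → D_getMaximumGenerated n → getMaximumGenerated n ≠ getMaximumGenerated_alt n

-- ===== LEMMAS AND PROOFS =====

-- the generated sequence, defined by the index recurrence (proof-side reference)
def g : Nat → Int
  | 0 => 0
  | 1 => 1
  | (k + 2) =>
    if h : (k + 2) % 2 = 0 then g ((k + 2) / 2)
    else g ((k + 2) / 2) + g ((k + 2) / 2 + 1)
  decreasing_by all_goals omega

lemma g_zero : g 0 = 0 := by simp [g]
lemma g_one : g 1 = 1 := by simp [g]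

lemma g_two_mul (i : Nat) (h : 1 ≤ i) : g (2 * i) = g i := by
  obtain ⟨j, rfl⟩ : ∃ j, i = j + 1 := ⟨i - 1, by omega⟩
  rw [show 2 * (j + 1) = 2 * j + 2 by ring, g, dif_pos (by omega),
    show (2 * j + 2) / 2 = j + 1 by omega]

lemma g_two_mul_add_one (i : Nat) (h : 1 ≤ i) : g (2 * i + 1) = g i + g (i + 1) := by
  obtain ⟨j, rfl⟩ : ∃ j, i = j + 1 := ⟨i - 1, by omega⟩
  rw [show 2 * (j + 1) + 1 = (2 * j + 1) + 2 by ring, g, dif_neg (by omega),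
    show (2 * j + 1 + 2) / 2 = j + 1 by omega]

lemma getD_toArray (xs : List Int) (k : Nat) (d : Int) : xs.toArray.getD k d = xs.getD k d := by
  simp only [Array.getD, List.size_toArray, List.getD]
  by_cases h : k < xs.length
  · simp [h]
  · rw [dif_neg h, List.getElem?_eq_none_iff.mpr (by omega), Option.getD_none]

lemma getD_range_map (m k : Nat) (h : k < m) : ((List.range m).map g).getD k 0 = g k := by
  simp [List.getD, h]

lemma range_map_succ (m : Nat) :
    (List.range (m + 1)).map g = (List.range m).map g ++ [g m] := by
  rw [List.range_succ, List.map_append]; rfl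

lemma seed_eq : ([0, 1] : List Int) = (List.range 2).map g := by
  simp [List.range_succ, g_zero, g_one]

lemma dropLast_range_map (m : Nat) :
    ((List.range (m + 1)).map g).dropLast = (List.range m).map g := by
  rw [range_map_succ]; exact List.dropLast_concat ..

lemma aLoop_spec (n : Int) (hn : 0 ≤ n) (i : Nat) (h1 : 1 ≤ i) :
    aLoop n ((List.range (2 * i)).map g).toArray i
      = ((List.range (2 * max i (n.toNat / 2 + 1))).map g).toArray := by
  rw [aLoop]
  split
  · next h =>
    have hlen : ((List.range (2 * i)).map g).toArray.size = 2 * i := by simp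
    have hi : 2 * i ≤ n.toNat := by omega
    have e1 : ((List.range (2 * i)).map g).toArray.getD i 0 = g i := by
      rw [getD_toArray]; exact getD_range_map _ _ (by omega)
    have eL1 : ((List.range (2 * i)).map g).toArray.push (g i)
        = ((List.range (2 * i + 1)).map g).toArray := by
      rw [List.push_toArray]
      congr 1
      conv_rhs => rw [range_map_succ]
      rw [g_two_mul i h1]
    have e2 : ((List.range (2 * i + 1)).map g).toArray.getD i 0 = g i := by
      rw [getD_toArray]; exact getD_range_map _ _ (by omega)
    have e3 : ((List.range (2 * i + 1)).map g).toArray.getD (i + 1) 0 = g (i + 1) := by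
      rw [getD_toArray]; exact getD_range_map _ _ (by omega)
    simp only [e1, eL1, e2, e3]
    have eL2 : ((List.range (2 * i + 1)).map g).toArray.push (g i + g (i + 1))
        = ((List.range (2 * (i + 1))).map g).toArray := by
      rw [List.push_toArray]
      congr 1
      conv_rhs => rw [show 2 * (i + 1) = (2 * i + 1) + 1 by ring, range_map_succ]
      rw [g_two_mul_add_one i h1]
    rw [eL2, aLoop_spec n hn (i + 1) (by omega)]
    congr 3
    omega
  · next h =>
    have hlen : ((List.range (2 * i)).map g).toArray.size = 2 * i := by simp
    congr 3
    omega
  termination_by (n + 1 - 2 * i).toNat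
  decreasing_by omega

lemma a_char (n : Int) (hn : 0 ≤ n) :
    getMaximumGenerated n = pyMax ((List.range (n.toNat + 1)).map g) := by
  simp only [getMaximumGenerated]
  rw [show (#[0, 1] : Array Int) = (([0, 1] : List Int)).toArray from rfl, seed_eq,
    show (List.range 2).map g = (List.range (2 * 1)).map g by norm_num,
    aLoop_spec n hn 1 le_rfl, List.toList_toArray]
  set t := n.toNat with ht
  have hpar : (n % 2 == 0) = ((t % 2 : Nat) == 0) := by
    by_cases h2 : t % 2 = 0
    · have e1 : n % 2 = 0 := by omega
      simp [e1, h2]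
    · have e1 : n % 2 = 1 := by omega
      have e2 : t % 2 = 1 := by omega
      simp [e1, e2]
  rw [hpar]
  rcases Nat.even_or_odd t with ⟨k, hk⟩ | ⟨k, hk⟩
  · have hmod : (t % 2 : Nat) = 0 := by omega
    have hmax : 2 * max 1 (t / 2 + 1) = (t + 1) + 1 := by omega
    rw [hmax, if_pos (by simp [hmod]), PySem.List.slice_to_neg_one,
      dropLast_range_map]
  · have hmod : (t % 2 : Nat) = 1 := by omega
    have hmax : 2 * max 1 (t / 2 + 1) = t + 1 := by omega
    rw [hmax, if_neg (by simp [hmod])]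

-- the bit descent carries the pair (g cur, g (cur+1))
lemma bits_fold_spec : ∀ t : Nat, 1 ≤ t →
    (bBits ((t : Nat) : Int)).reverse.foldl
      (fun (p : Int × Int) bit =>
        if bit == 0 then (p.1, p.1 + p.2) else (p.1 + p.2, p.2)) (1, 1)
      = (g t, g (t + 1)) := by
  intro t
  induction t using Nat.strong_induction_on with
  | _ t ih =>
    intro ht
    rcases Nat.lt_or_ge t 2 with h2 | h2
    · interval_cases t
      rw [show bBits ((1 : Nat) : Int) = [] from by rw [bBits]; norm_num]
      rw [List.reverse_nil, List.foldl_nil, g_one,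
        show g 2 = 1 from by rw [show (2 : Nat) = 2 * 1 from rfl, g_two_mul 1 le_rfl, g_one]]
    · have hstep : bBits ((t : Nat) : Int)
          = ((t % 2 : Nat) : Int) :: bBits (((t / 2 : Nat) : Nat) : Int) := by
        rw [bBits, if_pos (by exact_mod_cast h2)]
        congr 1
        · exact_mod_cast PySem.Int.mod_natCast t 2
        · congr 1
          exact_mod_cast PySem.Int.floordiv_natCast t 2
      rw [hstep, List.reverse_cons, List.foldl_append, ih (t / 2) (by omega) (by omega),
        List.foldl_cons, List.foldl_nil]
      rcases Nat.even_or_odd t with ⟨j, hj⟩ | ⟨j, hj⟩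
      · have hd : t / 2 = j := by omega
        have hm : t % 2 = 0 := by omega
        rw [hd, hm]
        simp only [Nat.cast_zero, beq_self_eq_true, if_true]
        rw [show t = 2 * j from by omega, g_two_mul j (by omega),
          show 2 * j + 1 = 2 * j + 1 from rfl, g_two_mul_add_one j (by omega)]
      · have hd : t / 2 = j := by omega
        have hm : t % 2 = 1 := by omega
        rw [hd, hm]
        have hne : (((1 : Nat) : Int) == 0) = false := by decide
        simp only [hne, Bool.false_eq_true, if_false]
        rw [show t = 2 * j + 1 from by omega, g_two_mul_add_one j (by omega),
          show 2 * j + 1 + 1 = 2 * (j + 1) from by ring, g_two_mul (j + 1) (by omega)]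

-- Source B's helper computes the reference sequence (on positive indices)
lemma gOf_eq_g (t : Nat) (ht : 1 ≤ t) : gOf ((t : Nat) : Int) = g t := by
  unfold gOf
  rw [bits_fold_spec t ht]

lemma b_char (t : Nat) :
    getMaximumGenerated_alt ((t : Nat) : Int) = pyMax ((List.range (t + 1)).map g) := by
  unfold getMaximumGenerated_alt
  rw [PySem.List.pyRange_one, show ((t : Int) + 1 - 1).toNat = t by omega]
  -- right-hand side: max of g 0 :: [g 1, …, g t] as a running-max fold
  rw [List.range_succ_eq_map, List.map_cons, List.map_map]
  unfold pyMax
  rw [PySem.List.max?_id_cons, Option.getD_some, g_zero, List.foldl_map, List.foldl_map]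
  apply PySem.List.foldl_congr_mem
  intro b x hx
  rw [show ((1 : Int) + (x : Int)) = ((x + 1 : Nat) : Int) by push_cast; ring,
    gOf_eq_g (x + 1) (by omega), Function.comp_apply, Nat.succ_eq_add_one]

-- on negative n the loop never runs: A keeps the seed [0, 1], B's range is empty
lemma a_neg (n : Int) (hn : n < 0) :
    getMaximumGenerated n = if n % 2 == 0 then 0 else 1 := by
  unfold getMaximumGenerated
  rw [aLoop, dif_neg (by simp; omega)]
  by_cases h2 : n % 2 = 0
  · simp only [h2, beq_self_eq_true, if_true]
    decide
  · have hb : (n % 2 == 0) = false := by simpa using h2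
    simp only [hb, Bool.false_eq_true, if_false]
    decide

lemma b_neg (n : Int) (hn : n < 0) : getMaximumGenerated_alt n = 0 := by
  unfold getMaximumGenerated_alt
  rw [PySem.List.pyRange_one_eq_nil (by omega), List.foldl_nil]

-- ===== VERDICT (by name: the statements are the Claim_ definitions above) =====
theorem getMaximumGenerated_spec : Claim_unchanged_getMaximumGenerated := by
  intro n _ hnd
  rcases Int.lt_or_le n 0 with hn | hn
  · have hm : n % 2 = 0 := by
      unfold D_getMaximumGenerated at hnd
      omega
    rw [a_neg n hn, b_neg n hn, if_pos (by simpa using hm)]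
  · obtain ⟨t, rfl⟩ : ∃ t : Nat, n = (t : Int) := ⟨n.toNat, by omega⟩
    rw [a_char _ (by omega), b_char t]
    norm_num

theorem getMaximumGenerated_changed : Claim_changed_getMaximumGenerated := by
  unfold Claim_changed_getMaximumGenerated
  refine ⟨by decide, by decide, ?_, ?_, by decide⟩
  · rw [show pvDiffWitness_getMaximumGenerated = -1 from rfl, a_neg (-1) (by omega)]
    decide
  · rw [show pvDiffWitness_getMaximumGenerated = -1 from rfl, b_neg (-1) (by omega)]
    decide

theorem getMaximumGenerated_tight : Claim_exact_getMaximumGenerated := by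
  intro n _ hd
  obtain ⟨hn, hm⟩ := hd
  rw [a_neg n hn, b_neg n hn, if_neg (by simp [hm])]
  decide
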